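-- pv_equiv track=rewrite | github.com/jopolko/kidsevents | scrapers/toronto_opendata_api_scraper.py | _determine_age_groups
-- ===== SOURCE A (Python) =====
-- from typing import List, Dict
--
-- def _determine_age_groups(name: str, description: str) -> List[str]:
--     """Determine age groups from event details"""
--
--     text = (name + ' ' + description).lower()
--     age_groups = []
--
--     if any(word in text for word in ['baby', 'babies', 'infant', '0-2']):
--         age_groups.append('Babies (0-2)')
--     if any(word in text for word in ['toddler', 'preschool', '3-5', '2-5']):
--         age_groups.append('Toddlers (3-5)')
--     if any(word in text for word in ['kid', 'children', '6-12', 'elementary']):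
--         age_groups.append('Kids (6-12)')
--     if any(word in text for word in ['teen', 'youth', '13-17']):
--         age_groups.append('Teens (13-17)')
--     if any(word in text for word in ['family', 'all ages', 'everyone']):
--         age_groups.append('All Ages')
--
--     return age_groups if age_groups else ['All Ages']
-- ===== SOURCE B (Python) =====
-- from typing import List
--
-- _RULES = [
--     (('baby', 'babies', 'infant', '0-2'), 'Babies (0-2)'),
--     (('toddler', 'preschool', '3-5', '2-5'), 'Toddlers (3-5)'),
--     (('kid', 'children', '6-12', 'elementary'), 'Kids (6-12)'),
--     (('teen', 'youth', '13-17'), 'Teens (13-17)'),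
--     (('family', 'all ages', 'everyone'), 'All Ages'),
-- ]
--
-- def _determine_age_groups(name: str, description: str) -> List[str]:
--     """Single left-to-right scan of the text: at each position record the label
--     of every rule one of whose keywords starts there; then emit the recorded
--     labels in rule order (default 'All Ages' if none matched)."""
--     text = (name + ' ' + description).lower()
--     found = set()
--     for i in range(len(text)):
--         for keywords, label in _RULES:
--             if any(text.startswith(k, i) for k in keywords):
--                 found.add(label)
--     out = [label for _, label in _RULES if label in found]
--     return out if out else ['All Ages']
-- ===== Notes on version B (the rewrite author's own statement) =====
-- stated objective: alternative
-- what changed: Instead of running a separate substring search per keyword, B scans the lowercased text once left to right, at each position recording in a set the labels of rules with a keyword starting there, then emits the found labels in canonical rule order (default All Ages).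
import Mathlib
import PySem

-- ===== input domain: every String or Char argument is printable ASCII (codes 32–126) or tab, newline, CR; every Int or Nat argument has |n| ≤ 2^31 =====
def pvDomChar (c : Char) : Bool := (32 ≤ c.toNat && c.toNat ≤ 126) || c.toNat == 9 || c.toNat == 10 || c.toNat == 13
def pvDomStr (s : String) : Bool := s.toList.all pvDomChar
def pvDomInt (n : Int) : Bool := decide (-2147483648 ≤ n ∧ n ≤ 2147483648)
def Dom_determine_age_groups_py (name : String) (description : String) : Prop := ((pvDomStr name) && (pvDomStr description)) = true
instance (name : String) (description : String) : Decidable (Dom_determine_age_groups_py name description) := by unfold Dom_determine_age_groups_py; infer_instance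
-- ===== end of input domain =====

-- B replaces A's five per-keyword substring tests by a single left-to-right scan of the
-- text that records, at each position, the labels of rules with a keyword starting there;
-- objective: alternative (position-driven scan vs keyword-driven search).

-- ===== PORT A =====
def determine_age_groups_py (name : String) (description : String) : List String :=
  let text := PySem.Str.lower (name ++ " " ++ description)
  let age_groups : List String := []
  let age_groups := if ["baby", "babies", "infant", "0-2"].any (fun w => PySem.Str.isIn w text)
    then age_groups ++ ["Babies (0-2)"] else age_groups
  let age_groups := if ["toddler", "preschool", "3-5", "2-5"].any (fun w => PySem.Str.isIn w text)
    then age_groups ++ ["Toddlers (3-5)"] else age_groups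
  let age_groups := if ["kid", "children", "6-12", "elementary"].any (fun w => PySem.Str.isIn w text)
    then age_groups ++ ["Kids (6-12)"] else age_groups
  let age_groups := if ["teen", "youth", "13-17"].any (fun w => PySem.Str.isIn w text)
    then age_groups ++ ["Teens (13-17)"] else age_groups
  let age_groups := if ["family", "all ages", "everyone"].any (fun w => PySem.Str.isIn w text)
    then age_groups ++ ["All Ages"] else age_groups
  if age_groups = [] then ["All Ages"] else age_groups

-- ===== PORT B =====
def pvRules : List (List String × String) :=
  [(["baby", "babies", "infant", "0-2"], "Babies (0-2)"),
   (["toddler", "preschool", "3-5", "2-5"], "Toddlers (3-5)"),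
   (["kid", "children", "6-12", "elementary"], "Kids (6-12)"),
   (["teen", "youth", "13-17"], "Teens (13-17)"),
   (["family", "all ages", "everyone"], "All Ages")]

-- one position of the scan: text.startswith(k, i) on the suffix starting at i
def pvStep (t : List Char) (found : PySem.Set String) : PySem.Set String :=
  pvRules.foldl
    (fun f r => if r.1.any (fun k => k.toList.isPrefixOf t) then PySem.Set.add f r.2 else f)
    found

-- the scan over all positions 0 .. len-1 (successive nonempty suffixes)
def pvCollect : List Char → PySem.Set String → PySem.Set String
  | [], found => found
  | c :: rest, found => pvCollect rest (pvStep (c :: rest) found)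

def determine_age_groups_py_alt (name : String) (description : String) : List String :=
  let t := (PySem.Str.lower (name ++ " " ++ description)).toList
  let found := pvCollect t PySem.Set.empty
  let out := (pvRules.filter (fun r => PySem.Set.contains found r.2)).map (·.2)
  if out = [] then ["All Ages"] else out

-- ===== PRECONDITION & SPEC =====
def Spec_determine_age_groups_py (name : String) (description : String) (out : List String) : Prop := out = determine_age_groups_py_alt name description
instance (name : String) (description : String) (out : List String) : Decidable (Spec_determine_age_groups_py name description out) := by unfold Spec_determine_age_groups_py; infer_instance

-- ===== CLAIM =====
def Claim_equal_determine_age_groups_py : Prop := ∀ (name : String) (description : String), Dom_determine_age_groups_py name description → Spec_determine_age_groups_py name description (determine_age_groups_py name description)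

-- ===== LEMMAS AND PROOFS =====

lemma pv_mem_foldl_addIf (rs : List (List String × String)) (t : List Char)
    (found : PySem.Set String) (L : String) :
    L ∈ rs.foldl
      (fun f r => if r.1.any (fun k => k.toList.isPrefixOf t) then PySem.Set.add f r.2 else f)
      found
    ↔ L ∈ found ∨ ∃ r ∈ rs, (r.1.any (fun k => k.toList.isPrefixOf t)) = true ∧ r.2 = L := by
  induction rs generalizing found with
  | nil => simp
  | cons r rs ih =>
    simp only [List.foldl_cons]
    by_cases h : (r.1.any (fun k => k.toList.isPrefixOf t)) = true
    · rw [if_pos h, ih]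
      constructor
      · rintro (hm | ⟨r', hr', hp, hL⟩)
        · rcases (PySem.Set.mem_add found r.2 L).mp hm with hf | hL
          · exact Or.inl hf
          · exact Or.inr ⟨r, List.mem_cons_self .., h, hL.symm⟩
        · exact Or.inr ⟨r', List.mem_cons_of_mem _ hr', hp, hL⟩
      · rintro (hf | ⟨r', hr', hp, hL⟩)
        · exact Or.inl ((PySem.Set.mem_add found r.2 L).mpr (Or.inl hf))
        · rcases List.mem_cons.mp hr' with rfl | hr''
          · exact Or.inl ((PySem.Set.mem_add found r'.2 L).mpr (Or.inr hL.symm))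
          · exact Or.inr ⟨r', hr'', hp, hL⟩
    · rw [if_neg h, ih]
      constructor
      · rintro (hf | ⟨r', hr', hp, hL⟩)
        · exact Or.inl hf
        · exact Or.inr ⟨r', List.mem_cons_of_mem _ hr', hp, hL⟩
      · rintro (hf | ⟨r', hr', hp, hL⟩)
        · exact Or.inl hf
        · rcases List.mem_cons.mp hr' with rfl | hr''
          · exact absurd hp h
          · exact Or.inr ⟨r', hr'', hp, hL⟩

lemma pv_mem_step (t : List Char) (found : PySem.Set String) (L : String) :
    L ∈ pvStep t found
    ↔ L ∈ found ∨ ∃ r ∈ pvRules, (r.1.any (fun k => k.toList.isPrefixOf t)) = true ∧ r.2 = L :=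
  pv_mem_foldl_addIf pvRules t found L

lemma pv_mem_collect (t : List Char) (found : PySem.Set String) (L : String) :
    L ∈ pvCollect t found
    ↔ L ∈ found ∨ ∃ r ∈ pvRules,
        (∃ s, s ≠ [] ∧ s <:+ t ∧ (r.1.any (fun k => k.toList.isPrefixOf s)) = true) ∧ r.2 = L := by
  induction t generalizing found with
  | nil => simp [pvCollect]
  | cons c rest ih =>
    rw [show pvCollect (c :: rest) found = pvCollect rest (pvStep (c :: rest) found) from rfl, ih,
      pv_mem_step]
    constructor
    · rintro ((hf | ⟨r, hr, hp, hL⟩) | ⟨r, hr, ⟨s, hs, hsfx, hp⟩, hL⟩)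
      · exact Or.inl hf
      · exact Or.inr ⟨r, hr, ⟨c :: rest, by simp, List.suffix_rfl, hp⟩, hL⟩
      · exact Or.inr ⟨r, hr, ⟨s, hs, hsfx.trans (List.suffix_cons c rest), hp⟩, hL⟩
    · rintro (hf | ⟨r, hr, ⟨s, hs, hsfx, hp⟩, hL⟩)
      · exact Or.inl (Or.inl hf)
      · rcases List.suffix_cons_iff.mp hsfx with heq | hsfx'
        · exact Or.inl (Or.inr ⟨r, hr, heq ▸ hp, hL⟩)
        · exact Or.inr ⟨r, hr, ⟨s, hs, hsfx', hp⟩, hL⟩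

lemma pv_exists_suffix_iff_infix {k t : List Char} (hk : k ≠ []) :
    (∃ s, s ≠ [] ∧ s <:+ t ∧ k <+: s) ↔ k <:+: t := by
  constructor
  · rintro ⟨s, _, hsfx, hpre⟩
    exact hpre.isInfix.trans hsfx.isInfix
  · rintro ⟨l, r, hlr⟩
    have h2 : l ++ (k ++ r) = t := by rw [← List.append_assoc]; exact hlr
    exact ⟨k ++ r, by simp [hk], ⟨l, h2⟩, ⟨r, rfl⟩⟩

-- per-rule: membership after the scan = the keyword-driven 'any isIn' test of A
lemma pv_mem_collect_label (kws : List String) (L : String) (hr : (kws, L) ∈ pvRules)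
    (huniq : ∀ r ∈ pvRules, r.2 = L → r = (kws, L))
    (hne : ∀ k ∈ kws, k.toList ≠ []) (text : String) :
    L ∈ pvCollect text.toList PySem.Set.empty
    ↔ (kws.any (fun w => PySem.Str.isIn w text)) = true := by
  rw [pv_mem_collect]
  simp only [PySem.Set.empty, List.not_mem_nil, false_or]
  constructor
  · rintro ⟨r, hrmem, ⟨s, hs, hsfx, hp⟩, hL⟩
    have := huniq r hrmem hL
    subst this
    rcases List.any_eq_true.mp hp with ⟨k, hk, hpre⟩
    refine List.any_eq_true.mpr ⟨k, hk, ?_⟩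
    rw [PySem.Str.isIn_iff_infix]
    exact (pv_exists_suffix_iff_infix (hne k hk)).mp
      ⟨s, hs, hsfx, List.isPrefixOf_iff_prefix.mp hpre⟩
  · intro h
    rcases List.any_eq_true.mp h with ⟨k, hk, hin⟩
    rw [PySem.Str.isIn_iff_infix] at hin
    rcases (pv_exists_suffix_iff_infix (hne k hk)).mpr hin with ⟨s, hs, hsfx, hpre⟩
    exact ⟨(kws, L), hr, ⟨s, hs, hsfx,
      List.any_eq_true.mpr ⟨k, hk, List.isPrefixOf_iff_prefix.mpr hpre⟩⟩, rfl⟩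

lemma pv_bool_eq_of_iff {a b : Bool} (h : a = true ↔ b = true) : a = b := by
  cases a <;> cases b <;> simp_all

-- ===== VERDICT =====
theorem determine_age_groups_py_spec : Claim_equal_determine_age_groups_py := by
  intro name description _
  unfold Spec_determine_age_groups_py determine_age_groups_py determine_age_groups_py_alt
  generalize htext : PySem.Str.lower (name ++ " " ++ description) = text
  have h1 := pv_bool_eq_of_iff ((PySem.Set.contains_iff _ _).trans
    (pv_mem_collect_label ["baby", "babies", "infant", "0-2"] "Babies (0-2)"
      (by decide) (by decide) (by decide) text))
  have h2 := pv_bool_eq_of_iff ((PySem.Set.contains_iff _ _).trans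
    (pv_mem_collect_label ["toddler", "preschool", "3-5", "2-5"] "Toddlers (3-5)"
      (by decide) (by decide) (by decide) text))
  have h3 := pv_bool_eq_of_iff ((PySem.Set.contains_iff _ _).trans
    (pv_mem_collect_label ["kid", "children", "6-12", "elementary"] "Kids (6-12)"
      (by decide) (by decide) (by decide) text))
  have h4 := pv_bool_eq_of_iff ((PySem.Set.contains_iff _ _).trans
    (pv_mem_collect_label ["teen", "youth", "13-17"] "Teens (13-17)"
      (by decide) (by decide) (by decide) text))
  have h5 := pv_bool_eq_of_iff ((PySem.Set.contains_iff _ _).trans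
    (pv_mem_collect_label ["family", "all ages", "everyone"] "All Ages"
      (by decide) (by decide) (by decide) text))
  simp only [pvRules, List.filter_cons, List.filter_nil, h1, h2, h3, h4, h5]
  generalize (["baby", "babies", "infant", "0-2"].any (fun w => PySem.Str.isIn w text)) = c1
  generalize (["toddler", "preschool", "3-5", "2-5"].any (fun w => PySem.Str.isIn w text)) = c2
  generalize (["kid", "children", "6-12", "elementary"].any (fun w => PySem.Str.isIn w text)) = c3
  generalize (["teen", "youth", "13-17"].any (fun w => PySem.Str.isIn w text)) = c4
  generalize (["family", "all ages", "everyone"].any (fun w => PySem.Str.isIn w text)) = c5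
  cases c1 <;> cases c2 <;> cases c3 <;> cases c4 <;> cases c5 <;> rfl
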